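-- pv_equiv track=rewrite | github.com/jay13jay/metaPractice | art/pyAlgo.py | getPlusSignCount
-- ===== SOURCE A (Python) =====
-- from typing import List
--
-- def getPlusSignCount(N: int, L: List[int], D: str) -> int:
--     pos = [0, 0]
--     x_lines = []
--     y_lines = []
--     plus_sign_count = 0
--
--     for stroke in range(0, len(L)):
--         if D[stroke] == "U":
--             y_lines.append([[pos[1], pos[1] + L[stroke]], pos[0]])
--             pos[1] = pos[1] + L[stroke]
--         elif D[stroke] == "D":
--             y_lines.append([[pos[1], pos[1] - L[stroke]], pos[0]])
--             pos[1] = pos[1] - L[stroke]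
--         elif D[stroke] == "L":
--             x_lines.append([[pos[0], pos[0] - L[stroke]], pos[1]])
--             pos[0] = pos[0] - L[stroke]
--         elif D[stroke] == "R":
--             x_lines.append([[pos[0], pos[0] + L[stroke]], pos[1]])
--             pos[0] = pos[0] + L[stroke]
--
--     # order line start / end values to be from least to greatest
--     # in order to merge later
--     for x in range(0, len(x_lines)):
--         if x_lines[x][0][0] > x_lines[x][0][1]:
--             x_lines[x] = [[x_lines[x][0][1], x_lines[x][0][0]], x_lines[x][1]]
--     for y in range(0, len(y_lines)):
--         if y_lines[y][0][0] > y_lines[y][0][1]: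
--             y_lines[y] = [[y_lines[y][0][1], y_lines[y][0][0]], y_lines[y][1]]
--
--
--     # merge line that intersect
--     def merge_lines(lines):
--         merged_lines = []
--         for line in lines:
--             for existing_line in merged_lines:
--                 if line[1] == existing_line[1]:
--                     if line[0][1] >= existing_line[0][0] and line[0][0] <= existing_line[0][1]:
--                         existing_line[0] = [min(line[0][0], existing_line[0][0]), max(line[0][1], existing_line[0][1])]
--                         break
--             else:
--                 merged_lines.append(line)
--         return merged_lines
--
--     x_lines = merge_lines(x_lines)
--     y_lines = merge_lines(y_lines)
--
--     # get valid coordinates from both lines (ie don't include line start / end points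
--     vaLid_xline_coords = set()
--     valid_yline_coords = set()
--
--     for line in x_lines:
--         for i in range(line[0][0] + 1, line[0][1]):
--             vaLid_xline_coords.add((i, line[1]))
--
--     for line in y_lines:
--         for i in range(line[0][0] + 1, line[0][1]):
--             valid_yline_coords.add((line[1], i))
--
--     for coordinate in vaLid_xline_coords:
--         if coordinate in valid_yline_coords:
--             plus_sign_count += 1
--
--     return plus_sign_count
-- ===== SOURCE B (Python) =====
-- def _mergeSegs(segs):
--     out = []
--     for a, b, c in segs:
--         for i, (a2, b2, c2) in enumerate(out):
--             if c == c2 and b >= a2 and a <= b2: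
--                 out[i] = (min(a, a2), max(b, b2), c2)
--                 break
--         else:
--             out.append((a, b, c))
--     return out
--
-- def getPlusSignCount(N, L, D):
--     x = y = 0
--     hs, vs = [], []
--     for length, d in zip(L, D):
--         if d == "U":
--             vs.append((min(y, y + length), max(y, y + length), x)); y += length
--         elif d == "D":
--             vs.append((min(y, y - length), max(y, y - length), x)); y -= length
--         elif d == "L":
--             hs.append((min(x, x - length), max(x, x - length), y)); x -= length
--         elif d == "R":
--             hs.append((min(x, x + length), max(x, x + length), y)); x += length
--     pts = {(vx, hy)
--            for (ha, hb, hy) in _mergeSegs(hs)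
--            for (va, vb, vx) in _mergeSegs(vs)
--            if ha < vx < hb and va < hy < vb}
--     return len(pts)
-- ===== Notes on version B (the rewrite author's own statement) =====
-- stated objective: alternative
-- what changed: B replaces A's enumeration of every interior lattice point of each merged segment into two large point sets with a pairwise horizontal-by-vertical interior-overlap test that inserts only the actual crossing points into one set; segments are also built already normalized in a single zip(L, D) pass instead of A's index loop plus a separate normalization pass. It trades the per-point set building for a pairwise segment check, so its cost does not grow with the stroke lengths (a timing run's stroke-count scaling showed only ~1.5x, so no speed is claimed).
import Mathlib
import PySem

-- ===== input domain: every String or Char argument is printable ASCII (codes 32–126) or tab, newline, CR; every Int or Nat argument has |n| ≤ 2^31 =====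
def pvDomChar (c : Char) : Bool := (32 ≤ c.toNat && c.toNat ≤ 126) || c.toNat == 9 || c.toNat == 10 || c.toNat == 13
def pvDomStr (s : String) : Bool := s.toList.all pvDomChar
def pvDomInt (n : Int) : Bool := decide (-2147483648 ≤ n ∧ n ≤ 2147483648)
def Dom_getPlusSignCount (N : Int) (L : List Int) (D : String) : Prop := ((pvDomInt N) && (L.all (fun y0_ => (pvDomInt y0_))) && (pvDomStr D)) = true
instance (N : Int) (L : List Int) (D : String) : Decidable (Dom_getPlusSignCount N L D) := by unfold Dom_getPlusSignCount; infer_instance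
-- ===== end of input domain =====

-- B replaces A's per-lattice-point enumeration of the merged segments with a pairwise
-- horizontal×vertical interior-crossing test over the segments (objective: alternative).

-- ===== PORT A =====
-- A's loop body for one stroke: D[stroke] is matched first (Python indexes D first; the
-- `none` case is an IndexError, excluded by Pre_); L[stroke] is always in range for
-- stroke ∈ range(len(L)), so it is read with pyGetD.
def pvADo (st : (Int × Int) × List ((Int × Int) × Int) × List ((Int × Int) × Int))
    (len : Int) (c : Char) :
    (Int × Int) × List ((Int × Int) × Int) × List ((Int × Int) × Int) :=
  let pos := st.1
  let xl := st.2.1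
  let yl := st.2.2
  if c = 'U' then ((pos.1, pos.2 + len), xl, yl ++ [((pos.2, pos.2 + len), pos.1)])
  else if c = 'D' then ((pos.1, pos.2 - len), xl, yl ++ [((pos.2, pos.2 - len), pos.1)])
  else if c = 'L' then ((pos.1 - len, pos.2), xl ++ [((pos.1, pos.1 - len), pos.2)], yl)
  else if c = 'R' then ((pos.1 + len, pos.2), xl ++ [((pos.1, pos.1 + len), pos.2)], yl)
  else st

def pvAStroke (L : List Int) (D : String)
    (st : (Int × Int) × List ((Int × Int) × Int) × List ((Int × Int) × Int)) (stroke : Int) :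
    (Int × Int) × List ((Int × Int) × Int) × List ((Int × Int) × Int) :=
  match PySem.Str.pyGet? D stroke with
  | none => st
  | some c => pvADo st (PySem.List.pyGetD L stroke 0) c

-- A's in-place normalization loop (swap endpoints if reversed), ported as a map over the list.
def pvANorm (l : (Int × Int) × Int) : (Int × Int) × Int :=
  if l.1.1 > l.1.2 then ((l.1.2, l.1.1), l.2) else l

-- inner `for existing_line in merged_lines: … break / else: append` scan:
-- some m = the list after the first successful merge, none = the for-else (no merge).
def pvAScan (line : (Int × Int) × Int) :
    List ((Int × Int) × Int) → Option (List ((Int × Int) × Int))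
  | [] => none
  | e :: rest =>
    if line.2 = e.2 ∧ line.1.2 ≥ e.1.1 ∧ line.1.1 ≤ e.1.2 then
      some (((min line.1.1 e.1.1, max line.1.2 e.1.2), e.2) :: rest)
    else
      match pvAScan line rest with
      | some rest' => some (e :: rest')
      | none => none

def pvAMergeLines (lines : List ((Int × Int) × Int)) : List ((Int × Int) × Int) :=
  lines.foldl (fun merged line =>
    match pvAScan line merged with
    | some m => m
    | none => merged ++ [line]) []

def pvAXCoords (xl : List ((Int × Int) × Int)) : PySem.Set (Int × Int) :=
  xl.foldl (fun s line =>
    (PySem.List.pyRange (line.1.1 + 1) line.1.2).foldl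
      (fun s i => PySem.Set.add s (i, line.2)) s) PySem.Set.empty

def pvAYCoords (yl : List ((Int × Int) × Int)) : PySem.Set (Int × Int) :=
  yl.foldl (fun s line =>
    (PySem.List.pyRange (line.1.1 + 1) line.1.2).foldl
      (fun s i => PySem.Set.add s (line.2, i)) s) PySem.Set.empty

def getPlusSignCount (N : Int) (L : List Int) (D : String) : Int :=
  let st := (PySem.List.pyRange 0 (L.length : Int)).foldl (pvAStroke L D) ((0, 0), ([], []))
  let xLines := (st.2.1.map pvANorm)
  let yLines := (st.2.2.map pvANorm)
  let xm := pvAMergeLines xLines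
  let ym := pvAMergeLines yLines
  let X := pvAXCoords xm
  let Y := pvAYCoords ym
  X.foldl (fun acc p => if p ∈ Y then acc + 1 else acc) 0

-- ===== PORT B =====
-- segments are (lo, hi, coord), built already normalized with min/max
def pvBStroke (st : (Int × Int) × List (Int × Int × Int) × List (Int × Int × Int))
    (p : Int × Char) :
    (Int × Int) × List (Int × Int × Int) × List (Int × Int × Int) :=
  let x := st.1.1
  let y := st.1.2
  let hs := st.2.1
  let vs := st.2.2
  let len := p.1
  if p.2 = 'U' then ((x, y + len), hs, vs ++ [(min y (y + len), max y (y + len), x)])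
  else if p.2 = 'D' then ((x, y - len), hs, vs ++ [(min y (y - len), max y (y - len), x)])
  else if p.2 = 'L' then ((x - len, y), hs ++ [(min x (x - len), max x (x - len), y)], vs)
  else if p.2 = 'R' then ((x + len, y), hs ++ [(min x (x + len), max x (x + len), y)], vs)
  else st

-- _mergeSegs inner loop: replace the first same-coordinate overlapping entry, else append
def pvBPlace (s : Int × Int × Int) : List (Int × Int × Int) → List (Int × Int × Int)
  | [] => [s]
  | e :: rest =>
    if s.2.2 = e.2.2 ∧ e.1 ≤ s.2.1 ∧ s.1 ≤ e.2.1 then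
      (min s.1 e.1, max s.2.1 e.2.1, e.2.2) :: rest
    else e :: pvBPlace s rest

def pvBMerge (segs : List (Int × Int × Int)) : List (Int × Int × Int) :=
  segs.foldl (fun out s => pvBPlace s out) []

def getPlusSignCount_alt (N : Int) (L : List Int) (D : String) : Int :=
  let st := (L.zip D.toList).foldl pvBStroke ((0, 0), ([], []))
  let hs := pvBMerge st.2.1
  let vs := pvBMerge st.2.2
  let pts : PySem.Set (Int × Int) :=
    hs.foldl (fun s h =>
      vs.foldl (fun s v =>
        if h.1 < v.2.2 ∧ v.2.2 < h.2.1 ∧ v.1 < h.2.2 ∧ h.2.2 < v.2.1 then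
          PySem.Set.add s (v.2.2, h.2.2)
        else s) s) PySem.Set.empty
  PySem.Set.len pts

-- ===== PRECONDITION & SPEC =====
-- Pre_ excludes exactly the inputs with len(D) < len(L), on which A raises IndexError.
def Pre_getPlusSignCount (N : Int) (L : List Int) (D : String) : Prop :=
  L.length ≤ D.toList.length
instance (N : Int) (L : List Int) (D : String) : Decidable (Pre_getPlusSignCount N L D) := by
  unfold Pre_getPlusSignCount; infer_instance

def pvWitness_getPlusSignCount : Int × List Int × String := (0, [2, 2, 2, 2], "RULD")

def Spec_getPlusSignCount (N : Int) (L : List Int) (D : String) (out : Int) : Prop := out = getPlusSignCount_alt N L D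
instance (N : Int) (L : List Int) (D : String) (out : Int) : Decidable (Spec_getPlusSignCount N L D out) := by unfold Spec_getPlusSignCount; infer_instance

-- ===== CLAIM (what is proved, stated in full; the proofs are below) =====
def Claim_equal_getPlusSignCount : Prop := ∀ (N : Int) (L : List Int) (D : String), Dom_getPlusSignCount N L D → Pre_getPlusSignCount N L D → Spec_getPlusSignCount N L D (getPlusSignCount N L D)


-- ===== LEMMAS AND PROOFS =====

-- conversion from B's (lo, hi, coord) to A's ((lo, hi), coord)
def pvConv (s : Int × Int × Int) : (Int × Int) × Int := ((s.1, s.2.1), s.2.2)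

-- the relation the stroke loops preserve
def pvR (stA : (Int × Int) × List ((Int × Int) × Int) × List ((Int × Int) × Int))
    (stB : (Int × Int) × List (Int × Int × Int) × List (Int × Int × Int)) : Prop :=
  stA.1 = stB.1 ∧ stA.2.1.map pvANorm = stB.2.1.map pvConv ∧ stA.2.2.map pvANorm = stB.2.2.map pvConv

lemma pvNorm_mk (a b c : Int) : pvANorm ((a, b), c) = ((min a b, max a b), c) := by
  simp only [pvANorm, min_def, max_def]
  split_ifs <;> simp_all; omega

lemma pvR_step (stA stB) (len : Int) (c : Char) (h : pvR stA stB) :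
    pvR (pvADo stA len c) (pvBStroke stB (len, c)) := by
  obtain ⟨h1, h2, h3⟩ := h
  obtain ⟨⟨ax, ay⟩, xl, yl⟩ := stA
  obtain ⟨⟨bx, by'⟩, hs, vs⟩ := stB
  simp only [Prod.mk.injEq] at h1
  obtain ⟨rfl, rfl⟩ := h1
  simp only [pvR, pvADo, pvBStroke] at *
  split_ifs <;>
    simp_all [List.map_append, pvNorm_mk, pvConv]

lemma pvR_fold (P : List (Int × Char)) : ∀ stA stB, pvR stA stB →
    pvR (P.foldl (fun st p => pvADo st p.1 p.2) stA) (P.foldl pvBStroke stB) := by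
  induction P with
  | nil => exact fun _ _ h => h
  | cons p t ih =>
    intro stA stB h
    simp only [List.foldl_cons]
    have := pvR_step stA stB p.1 p.2 h
    rw [show (p.1, p.2) = p from rfl] at this
    exact ih _ _ this

lemma pvZipTake (L : List Int) (cs : List Char) : L.zip (cs.take L.length) = L.zip cs := by
  induction L generalizing cs with
  | nil => simp
  | cons a t ih =>
    cases cs with
    | nil => simp
    | cons c cst => simp [List.zip_cons_cons, ih]

-- A's indexed stroke loop equals a fold over zip(L, D) when D is long enough
lemma pvIdxZip {σ : Type} (g : σ → Int → Char → σ) (L : List Int) (D : String)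
    (h : L.length ≤ D.toList.length) (init : σ) :
    (PySem.List.pyRange 0 (L.length : Int)).foldl
      (fun st i => match PySem.Str.pyGet? D i with
        | none => st
        | some c => g st (PySem.List.pyGetD L i 0) c) init
    = (L.zip D.toList).foldl (fun st p => g st p.1 p.2) init := by
  induction L using List.reverseRecOn with
  | nil => simp [PySem.List.pyRange_one_eq_nil]
  | append_singleton L a ih =>
    have hD : L.length < D.toList.length := by
      rw [List.length_append, List.length_cons, List.length_nil] at h; omega
    have hlen : (((L ++ [a]).length : Nat) : Int) = (L.length : Int) + 1 := by
      simp
    rw [hlen, PySem.List.pyRange_one_succ_right (by positivity), List.foldl_append]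
    rw [PySem.List.foldl_congr_mem _ _
      (fun st i => match PySem.Str.pyGet? D i with
        | none => st
        | some c => g st (PySem.List.pyGetD L i 0) c) init
      (by
        intro acc i hi
        rw [PySem.List.mem_pyRange_one] at hi
        have hgd : PySem.List.pyGetD (L ++ [a]) i 0 = PySem.List.pyGetD L i 0 := by
          rw [PySem.List.pyGetD_eq_getElem _ _ hi.1
                (by rw [List.length_append, List.length_cons, List.length_nil]; push_cast; omega),
              PySem.List.pyGetD_eq_getElem _ _ hi.1 (by omega),
              List.getElem_append_left (by omega)]
        rw [hgd])]
    rw [ih (by omega)]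
    have hget : PySem.Str.pyGet? D (L.length : Int) = some (D.toList[L.length]'hD) := by
      have hb : PySem.Str.pyGet? D (L.length : Int) = PySem.List.pyGet? D.toList (L.length : Int) := by
        simp [PySem.Str.pyGet?]
      rw [hb, PySem.List.pyGet?_eq_some_getElem _ (by positivity) (by exact_mod_cast hD)]
      simp
    have hgetL : PySem.List.pyGetD (L ++ [a]) (L.length : Int) 0 = a := by
      rw [PySem.List.pyGetD_eq_getElem _ _ (by positivity) (by simp)]
      simp
    have hzip : (L ++ [a]).zip D.toList
        = L.zip D.toList ++ [(a, D.toList[L.length]'hD)] := by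
      rw [← pvZipTake (L ++ [a]) D.toList]
      have hsplit : D.toList.take (L ++ [a]).length
          = D.toList.take L.length ++ [D.toList[L.length]'hD] := by
        rw [show (L ++ [a]).length = L.length + 1 by
              rw [List.length_append, List.length_cons, List.length_nil],
            List.take_add_one, List.getElem?_eq_getElem hD]
        rfl
      rw [hsplit, List.zip_append (by rw [List.length_take]; omega), pvZipTake]
      rfl
    rw [hzip, List.foldl_append]
    simp only [List.foldl_cons, List.foldl_nil]
    rw [hget, hgetL]

-- merge commutes with pvConv
lemma pvScanPlace (s : Int × Int × Int) (out : List (Int × Int × Int)) :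
    (match pvAScan (pvConv s) (out.map pvConv) with
     | some m => m
     | none => out.map pvConv ++ [pvConv s]) = (pvBPlace s out).map pvConv := by
  induction out with
  | nil => simp [pvAScan, pvBPlace]
  | cons e rest ih =>
    simp only [List.map_cons, pvAScan, pvBPlace, pvConv, ge_iff_le]
    by_cases hc : s.2.2 = e.2.2 ∧ e.1 ≤ s.2.1 ∧ s.1 ≤ e.2.1
    · rw [if_pos hc, if_pos hc]
      simp [pvConv]
    · rw [if_neg hc, if_neg hc]
      simp only [pvConv] at ih ⊢
      cases h : pvAScan ((s.1, s.2.1), s.2.2) (List.map pvConv rest) <;>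
        rw [h] at ih <;> simp [← ih, pvConv]

lemma pvMerge_map (ls : List (Int × Int × Int)) :
    pvAMergeLines (ls.map pvConv) = (pvBMerge ls).map pvConv := by
  have key : ∀ (l out : List (Int × Int × Int)),
      l.foldl (fun merged line =>
        match pvAScan (pvConv line) merged with
        | some m => m
        | none => merged ++ [pvConv line]) (out.map pvConv)
      = (l.foldl (fun out s => pvBPlace s out) out).map pvConv := by
    intro l
    induction l with
    | nil => intro out; rfl
    | cons a t ih =>
      intro out
      simp only [List.foldl_cons]
      rw [pvScanPlace a out]
      exact ih _
  have h0 := key ls []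
  simpa [pvAMergeLines, pvBMerge, List.foldl_map] using h0

lemma pvMemFold {α β : Type} [BEq α] [LawfulBEq α] (l : List β)
    (F : PySem.Set α → β → PySem.Set α) (P : β → α → Prop)
    (H : ∀ s b y, y ∈ F s b ↔ y ∈ s ∨ P b y) :
    ∀ (s : PySem.Set α) (y : α), y ∈ l.foldl F s ↔ y ∈ s ∨ ∃ b ∈ l, P b y := by
  induction l with
  | nil => simp
  | cons b t ih =>
    intro s y
    simp only [List.foldl_cons, ih, H, List.mem_cons]
    constructor
    · rintro ((h | h) | ⟨b', hb', h⟩)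
      · exact Or.inl h
      · exact Or.inr ⟨b, Or.inl rfl, h⟩
      · exact Or.inr ⟨b', Or.inr hb', h⟩
    · rintro (h | ⟨b', (rfl | hb'), h⟩)
      · exact Or.inl (Or.inl h)
      · exact Or.inl (Or.inr h)
      · exact Or.inr ⟨b', hb', h⟩

lemma pvNodupFold {α β : Type} (l : List β) (F : PySem.Set α → β → PySem.Set α)
    (H : ∀ s b, List.Nodup s → List.Nodup (F s b)) :
    ∀ (s : PySem.Set α), List.Nodup s → List.Nodup (l.foldl F s) := by
  induction l with
  | nil => exact fun s h => h
  | cons b t ih => exact fun s h => ih _ (H s b h)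

lemma pvMemX (ls : List ((Int × Int) × Int)) (p : Int × Int) :
    p ∈ pvAXCoords ls ↔ ∃ l ∈ ls, (l.1.1 < p.1 ∧ p.1 < l.1.2) ∧ p.2 = l.2 := by
  have H : ∀ (s : PySem.Set (Int × Int)) (line : (Int × Int) × Int) (y : Int × Int),
      y ∈ (PySem.List.pyRange (line.1.1 + 1) line.1.2).foldl
            (fun s i => PySem.Set.add s (i, line.2)) s
        ↔ y ∈ s ∨ ∃ i, (line.1.1 < i ∧ i < line.1.2) ∧ y = (i, line.2) := by
    intro s line y
    rw [PySem.Set.mem_foldl_add]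
    simp [PySem.List.mem_pyRange_one]
  rw [pvAXCoords, pvMemFold _ _ _ H]
  simp only [PySem.Set.empty, List.not_mem_nil, false_or]
  constructor
  · rintro ⟨l, hl, i, hi, rfl⟩
    exact ⟨l, hl, hi, rfl⟩
  · rintro ⟨l, hl, hi, hp⟩
    exact ⟨l, hl, p.1, hi, by rw [Prod.ext_iff]; exact ⟨rfl, hp⟩⟩

lemma pvMemY (ls : List ((Int × Int) × Int)) (p : Int × Int) :
    p ∈ pvAYCoords ls ↔ ∃ l ∈ ls, (l.1.1 < p.2 ∧ p.2 < l.1.2) ∧ p.1 = l.2 := by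
  have H : ∀ (s : PySem.Set (Int × Int)) (line : (Int × Int) × Int) (y : Int × Int),
      y ∈ (PySem.List.pyRange (line.1.1 + 1) line.1.2).foldl
            (fun s i => PySem.Set.add s (line.2, i)) s
        ↔ y ∈ s ∨ ∃ i, (line.1.1 < i ∧ i < line.1.2) ∧ y = (line.2, i) := by
    intro s line y
    rw [PySem.Set.mem_foldl_add]
    simp [PySem.List.mem_pyRange_one]
  rw [pvAYCoords, pvMemFold _ _ _ H]
  simp only [PySem.Set.empty, List.not_mem_nil, false_or]
  constructor
  · rintro ⟨l, hl, i, hi, rfl⟩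
    exact ⟨l, hl, hi, rfl⟩
  · rintro ⟨l, hl, hi, hp⟩
    exact ⟨l, hl, p.2, hi, by rw [Prod.ext_iff]; exact ⟨hp, rfl⟩⟩

lemma pvMemPts (xm ym : List (Int × Int × Int)) (p : Int × Int) :
    p ∈ xm.foldl (fun s h =>
        ym.foldl (fun s v =>
          if h.1 < v.2.2 ∧ v.2.2 < h.2.1 ∧ v.1 < h.2.2 ∧ h.2.2 < v.2.1 then
            PySem.Set.add s (v.2.2, h.2.2)
          else s) s) PySem.Set.empty
    ↔ ∃ h ∈ xm, ∃ v ∈ ym,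
        (h.1 < v.2.2 ∧ v.2.2 < h.2.1 ∧ v.1 < h.2.2 ∧ h.2.2 < v.2.1) ∧ p = (v.2.2, h.2.2) := by
  rw [pvMemFold _ _
    (fun h y => ∃ v ∈ ym,
      (h.1 < v.2.2 ∧ v.2.2 < h.2.1 ∧ v.1 < h.2.2 ∧ h.2.2 < v.2.1) ∧ y = (v.2.2, h.2.2))
    (fun s h y => by
      rw [pvMemFold _ _
        (fun v y => (h.1 < v.2.2 ∧ v.2.2 < h.2.1 ∧ v.1 < h.2.2 ∧ h.2.2 < v.2.1) ∧ y = (v.2.2, h.2.2))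
        (fun s v y => by split_ifs with hc <;> simp [PySem.Set.mem_add, hc]) s y])]
  simp [PySem.Set.empty]

lemma pvNodupPts (xm ym : List (Int × Int × Int)) :
    (xm.foldl (fun s h =>
        ym.foldl (fun s v =>
          if h.1 < v.2.2 ∧ v.2.2 < h.2.1 ∧ v.1 < h.2.2 ∧ h.2.2 < v.2.1 then
            PySem.Set.add s (v.2.2, h.2.2)
          else s) s) PySem.Set.empty).Nodup := by
  refine pvNodupFold _ _ (fun s h hs => ?_) _ List.nodup_nil
  refine pvNodupFold _ _ (fun s v hs => ?_) _ hs
  split_ifs with hc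
  · exact PySem.Set.nodup_add _ _ hs
  · exact hs

lemma pvNodupX (ls : List ((Int × Int) × Int)) : (pvAXCoords ls).Nodup := by
  refine pvNodupFold _ _ (fun s l hs => ?_) _ List.nodup_nil
  exact pvNodupFold _ _ (fun s i hs => PySem.Set.nodup_add _ _ hs) _ hs

lemma pvCount (xm ym : List (Int × Int × Int)) :
    (pvAXCoords (xm.map pvConv)).foldl
      (fun acc p => if p ∈ pvAYCoords (ym.map pvConv) then acc + 1 else acc) 0
    = PySem.Set.len (xm.foldl (fun s h =>
        ym.foldl (fun s v =>
          if h.1 < v.2.2 ∧ v.2.2 < h.2.1 ∧ v.1 < h.2.2 ∧ h.2.2 < v.2.1 then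
            PySem.Set.add s (v.2.2, h.2.2)
          else s) s) PySem.Set.empty) := by
  rw [PySem.List.foldl_ite_add_one (fun p => p ∈ pvAYCoords (ym.map pvConv))]
  rw [List.countP_eq_length_filter, zero_add]
  rw [PySem.Set.len]
  congr 1
  apply List.Perm.length_eq
  rw [List.perm_ext_iff_of_nodup (List.Nodup.filter _ (pvNodupX _)) (pvNodupPts xm ym)]
  intro p
  rw [List.mem_filter, decide_eq_true_eq, pvMemX, pvMemPts]
  constructor
  · rintro ⟨⟨lx, hlx, hbx, hpx⟩, hY⟩
    rw [pvMemY] at hY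
    obtain ⟨ly, hly, hby, hpy⟩ := hY
    obtain ⟨h, hh, rfl⟩ := List.mem_map.mp hlx
    obtain ⟨v, hv, rfl⟩ := List.mem_map.mp hly
    simp only [pvConv] at hbx hpx hby hpy
    refine ⟨h, hh, v, hv, ⟨?_, ?_, ?_, ?_⟩, ?_⟩ <;> try omega
    · rw [Prod.ext_iff]; exact ⟨hpy, hpx⟩
  · rintro ⟨h, hh, v, hv, ⟨h1, h2, h3, h4⟩, rfl⟩
    constructor
    · exact ⟨pvConv h, List.mem_map_of_mem hh, by simp [pvConv]; omega⟩
    · rw [pvMemY]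
      exact ⟨pvConv v, List.mem_map_of_mem hv, by simp [pvConv]; omega⟩

theorem getPlusSignCount_spec : Claim_equal_getPlusSignCount := by
  intro N L D _ hPre
  unfold Spec_getPlusSignCount
  unfold Pre_getPlusSignCount at hPre
  simp only [getPlusSignCount, getPlusSignCount_alt]
  have hfun : pvAStroke L D = fun st i =>
      match PySem.Str.pyGet? D i with
      | none => st
      | some c => pvADo st (PySem.List.pyGetD L i 0) c := by
    funext st i
    rfl
  rw [hfun, pvIdxZip pvADo L D hPre]
  have hR := pvR_fold (L.zip D.toList) ((0, 0), ([], [])) ((0, 0), ([], [])) ⟨rfl, rfl, rfl⟩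
  obtain ⟨-, h2, h3⟩ := hR
  rw [h2, h3, pvMerge_map, pvMerge_map]
  exact pvCount _ _
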